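-- pv_equiv track=rewrite | github.com/c4ffein/qrcode | qrcode.py | _lost_point_level3
-- ===== SOURCE A (Python) =====
-- def _lost_point_level3(modules, modules_count):
--     modules_range = range(modules_count)
--     modules_range_short = range(modules_count - 10)
--     lost_point = 0
--     for row in modules_range:
--         this_row = modules[row]
--         modules_range_short_iter = iter(modules_range_short)
--         col = 0
--         for col in modules_range_short_iter:
--             if not this_row[col + 1] and this_row[col + 4] and (not this_row[col + 5]) and this_row[col + 6] and (not this_row[col + 9]) and (this_row[col + 0] and this_row[col + 2] and this_row[col + 3] and (not this_row[col + 7]) and (not this_row[col + 8]) and (not this_row[col + 10]) or (not this_row[col + 0] and (not this_row[col + 2]) and (not this_row[col + 3]) and this_row[col + 7] and this_row[col + 8] and this_row[col + 10])):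
--                 lost_point += 40
--             if this_row[col + 10]:
--                 next(modules_range_short_iter, None)
--     for col in modules_range:
--         modules_range_short_iter = iter(modules_range_short)
--         row = 0
--         for row in modules_range_short_iter:
--             if not modules[row + 1][col] and modules[row + 4][col] and (not modules[row + 5][col]) and modules[row + 6][col] and (not modules[row + 9][col]) and (modules[row + 0][col] and modules[row + 2][col] and modules[row + 3][col] and (not modules[row + 7][col]) and (not modules[row + 8][col]) and (not modules[row + 10][col]) or (not modules[row + 0][col] and (not modules[row + 2][col]) and (not modules[row + 3][col]) and modules[row + 7][col] and modules[row + 8][col] and modules[row + 10][col])):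
--                 lost_point += 40
--             if modules[row + 10][col]:
--                 next(modules_range_short_iter, None)
--     return lost_point
-- ===== SOURCE B (Python) =====
-- def _lost_point_level3(modules, modules_count):
--     if modules_count < 11:
--         return 0
--     patterns = ("10111010000", "00001011101")
--     lines = []
--     for row in modules[:modules_count]:
--         lines.append("".join("1" if m else "0" for m in row[:modules_count]))
--     for col in range(modules_count):
--         lines.append("".join("1" if modules[r][col] else "0" for r in range(modules_count)))
--     total = 0
--     for s in lines:
--         for pat in patterns:
--             start = 0
--             while True:
--                 i = s.find(pat, start)
--                 if i == -1:
--                     break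
--                 total += 1
--                 start = i + 1
--     return total * 40
-- ===== Notes on version B (the rewrite author's own statement) =====
-- stated objective: simpler
-- what changed: Replaces the manual 11-term boolean window test with iterator skip-ahead by converting each row and column to a '1'/'0' bit-string and counting overlapping occurrences of the two fixed patterns with a find-based loop; the skip logic is dropped since a skipped position can never match (both patterns force a 0 at offset 9).
import Mathlib
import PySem

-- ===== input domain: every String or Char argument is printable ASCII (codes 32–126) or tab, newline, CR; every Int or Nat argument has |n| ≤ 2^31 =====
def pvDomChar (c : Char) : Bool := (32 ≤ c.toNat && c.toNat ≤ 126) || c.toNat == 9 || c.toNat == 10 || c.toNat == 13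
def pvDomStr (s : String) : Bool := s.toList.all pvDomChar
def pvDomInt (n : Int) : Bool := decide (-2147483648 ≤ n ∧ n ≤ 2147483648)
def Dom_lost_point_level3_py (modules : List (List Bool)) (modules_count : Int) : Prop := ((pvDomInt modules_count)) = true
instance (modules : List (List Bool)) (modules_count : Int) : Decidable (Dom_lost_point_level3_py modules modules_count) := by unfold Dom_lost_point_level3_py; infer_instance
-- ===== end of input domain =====

-- B replaces A's 11-term boolean window test with iterator skip-ahead by a '1'/'0' bit-string
-- per row/column and a find-based overlapping count of the two fixed patterns (objective: simpler).

-- ===== PORT A =====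
-- the 11-module window condition of A, over an indexing function (row access or column access)
def aCond (bit : Int → Bool) (c : Int) : Bool :=
  !bit (c+1) && bit (c+4) && !bit (c+5) && bit (c+6) && !bit (c+9) &&
    ((bit (c+0) && bit (c+2) && bit (c+3) && !bit (c+7) && !bit (c+8) && !bit (c+10)) ||
     (!bit (c+0) && !bit (c+2) && !bit (c+3) && bit (c+7) && bit (c+8) && bit (c+10)))

-- A's inner loop over iter(modules_range_short): 'skip = true' models a pending next(iter, None)
def aScan (bit : Int → Bool) : List Int → Bool → Int → Int
  | [], _, lost => lost
  | c :: rest, skip, lost =>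
      if skip then aScan bit rest false lost
      else aScan bit rest (bit (c+10)) (if aCond bit c then lost + 40 else lost)

def lost_point_level3_py (modules : List (List Bool)) (modules_count : Int) : Int :=
  let modules_range := PySem.List.pyRange 0 modules_count 1
  let modules_range_short := PySem.List.pyRange 0 (modules_count - 10) 1
  let lost1 := modules_range.foldl (fun lost row =>
      let this_row := PySem.List.pyGetD modules row []
      aScan (fun i => PySem.List.pyGetD this_row i false) modules_range_short false lost) 0
  modules_range.foldl (fun lost col =>
      aScan (fun i => PySem.List.pyGetD (PySem.List.pyGetD modules i []) col false)
        modules_range_short false lost) lost1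

-- ===== PORT B =====
def pat1 : List Char := ['1','0','1','1','1','0','1','0','0','0','0']
def pat2 : List Char := ['0','0','0','0','1','0','1','1','1','0','1']
def bitChar (b : Bool) : Char := if b then '1' else '0'

-- the 'start = 0; while True: i = s.find(pat, start); …' loop; fuel only guards totality
def bFind (s pat : List Char) : Nat → Nat → Int → Int
  | 0, _, total => total
  | fuel+1, start, total =>
      let i := PySem.Chars.findFrom s pat (start : Int) none
      if i = -1 then total else bFind s pat fuel (i.toNat + 1) (total + 1)

def lost_point_level3_py_alt (modules : List (List Bool)) (modules_count : Int) : Int :=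
  if modules_count < 11 then 0 else
  let n := modules_count.toNat
  let rowLines := (modules.take n).map (fun row => (row.take n).map bitChar)
  let colLines := (List.range n).map (fun col =>
      (List.range n).map (fun r => bitChar ((modules.getD r []).getD col false)))
  ((rowLines ++ colLines).foldl (fun total s =>
      total + bFind s pat1 (s.length + 2) 0 0 + bFind s pat2 (s.length + 2) 0 0) 0) * 40

-- ===== PRECONDITION & SPEC =====
-- A raises IndexError when modules has fewer than modules_count rows, or (once the window scan
-- actually runs, i.e. 11 ≤ modules_count) when a scanned row is shorter than modules_count;
-- Pre_ excludes exactly that shape of malformed input. On a few such ragged grids (a short row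
-- whose missing cells the scan never reads) A does return, but B raises IndexError there too,
-- so they must stay outside Pre_.
def Pre_lost_point_level3_py (modules : List (List Bool)) (modules_count : Int) : Prop :=
  modules_count ≤ (modules.length : Int) ∧
    (11 ≤ modules_count → ∀ row ∈ modules.take modules_count.toNat, modules_count ≤ (row.length : Int))
instance (modules : List (List Bool)) (modules_count : Int) : Decidable (Pre_lost_point_level3_py modules modules_count) := by unfold Pre_lost_point_level3_py; infer_instance

def pvWitness_lost_point_level3_py : List (List Bool) × Int := ([[true]], 1)

def Spec_lost_point_level3_py (modules : List (List Bool)) (modules_count : Int) (out : Int) : Prop := out = lost_point_level3_py_alt modules modules_count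
instance (modules : List (List Bool)) (modules_count : Int) (out : Int) : Decidable (Spec_lost_point_level3_py modules modules_count out) := by unfold Spec_lost_point_level3_py; infer_instance

-- ===== CLAIM (what is proved, stated in full; the proofs are below) =====
def Claim_equal_lost_point_level3_py : Prop := ∀ (modules : List (List Bool)) (modules_count : Int), Dom_lost_point_level3_py modules modules_count → Pre_lost_point_level3_py modules modules_count → Spec_lost_point_level3_py modules modules_count (lost_point_level3_py modules modules_count)


-- ===== LEMMAS AND PROOFS =====

-- the Bool windows whose bit-strings are pat1 / pat2
def wpat1 : List Bool := [true, false, true, true, true, false, true, false, false, false, false]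
def wpat2 : List Bool := [false, false, false, false, true, false, true, true, true, false, true]

theorem aCond_of_nine (bit : Int → Bool) (c : Int) (h : bit (c + 9) = true) :
    aCond bit c = false := by
  simp [aCond, h]

theorem aScan_eq (bit : Int → Bool) :
    ∀ (j i : Nat) (lost : Int),
    aScan bit ((List.range' i j).map (fun (k : Nat) => (k : Int))) false lost
      = lost + 40 * ((List.range' i j).countP (fun (c : Nat) => aCond bit (c : Int)) : Int) := by
  intro j
  induction j using Nat.strong_induction_on with
  | _ j ih =>
    intro i lost
    match j with
    | 0 => simp [aScan]
    | 1 =>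
      simp only [List.range'_succ, List.range'_zero, List.map_cons, List.map_nil, aScan,
        Bool.false_eq_true, if_false, List.countP_cons, List.countP_nil]
      by_cases hc : aCond bit ((i : Nat) : Int) = true <;> simp [hc]
    | (k+2) =>
      rw [show (k+2) = (k+1)+1 from rfl, List.range'_succ]
      by_cases hskip : bit ((i : Int) + 10) = true
      · rw [List.range'_succ]
        simp only [List.map_cons, aScan, Bool.false_eq_true, if_false, hskip, if_pos rfl,
          List.tail_cons]
        rw [ih k (by omega) (i+1+1) _]
        simp only [List.countP_cons]
        have hc : aCond bit ((i + 1 : Nat) : Int) = false := by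
          apply aCond_of_nine
          rw [show ((i + 1 : Nat) : Int) + 9 = (i : Int) + 10 from by push_cast; ring]
          exact hskip
        rw [hc]
        by_cases hc0 : aCond bit ((i : Nat) : Int) = true <;> simp [hc0] <;> ring
      · simp only [List.map_cons, aScan, Bool.false_eq_true, if_false]
        rw [show bit ((i:Int)+10) = false from by simpa using hskip]
        rw [ih (k+1) (by omega) (i+1) _]
        simp only [List.countP_cons]
        by_cases hc0 : aCond bit ((i : Nat) : Int) = true <;> simp [hc0] <;> ring

theorem bFind_eq (s pat : List Char) (hp : pat ≠ []) :
    ∀ (fuel start : Nat) (total : Int), start ≤ s.length → s.length + 1 - start < fuel →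
    bFind s pat fuel start total
      = total + ((List.range' start (s.length + 1 - start)).countP
          (fun i => decide (pat <+: s.drop i)) : Int) := by
  intro fuel
  induction fuel using Nat.strong_induction_on with
  | _ fuel ih =>
    intro start total hs hf
    match fuel with
    | 0 => omega
    | (f+1) =>
      simp only [bFind]
      by_cases hneg : PySem.Chars.findFrom s pat (start : Int) none = -1
      · rw [if_pos hneg]
        have hno : ¬ pat <:+: s.drop start :=
          (PySem.Chars.findFrom_natCast_eq_neg_one_iff s pat start hs).mp hneg
        have hzero : (List.range' start (s.length + 1 - start)).countP
            (fun i => decide (pat <+: s.drop i)) = 0 := by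
          rw [List.countP_eq_zero]
          intro j hj
          simp only [decide_eq_true_eq]
          intro hpre
          apply hno
          have hj' : start ≤ j := (List.mem_range'_1.mp hj).1
          have h1 : pat <+: (s.drop start).drop (j - start) := by
            rw [List.drop_drop, show start + (j - start) = j from by omega]
            exact hpre
          exact h1.isInfix.trans (List.drop_suffix _ _).isInfix
        rw [hzero]; simp
      · rw [if_neg hneg]
        obtain ⟨hge, hpre, hmin⟩ := PySem.Chars.findFrom_natCast_spec s pat start hs hneg
        set i := PySem.Chars.findFrom s pat (start : Int) none with hi
        have hi0 : (0 : Int) ≤ i := le_trans (by positivity) hge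
        have hlt : i.toNat < s.length := by
          have hne : s.drop i.toNat ≠ [] := by
            intro hnil; rw [hnil] at hpre
            exact hp (List.prefix_nil.mp hpre)
          have := List.drop_eq_nil_iff.not.mp hne
          omega
        have hstart_le : start ≤ i.toNat := by omega
        rw [ih f (by omega) (i.toNat + 1) (total + 1) (by omega) (by omega)]
        have hsplit : List.range' start (s.length + 1 - start)
            = List.range' start (i.toNat - start)
              ++ (i.toNat :: List.range' (i.toNat + 1) (s.length - i.toNat)) := by
          rw [← List.range'_succ (s := i.toNat) (step := 1)]
          rw [show List.range' i.toNat (s.length - i.toNat + 1)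
              = List.range' (start + 1 * (i.toNat - start)) (s.length - i.toNat + 1) from by
            congr 1; omega]
          rw [List.range'_append]
          congr 1
          omega
        rw [hsplit, List.countP_append, List.countP_cons]
        have hzero : (List.range' start (i.toNat - start)).countP
            (fun j => decide (pat <+: s.drop j)) = 0 := by
          rw [List.countP_eq_zero]
          intro j hj
          have hj' := List.mem_range'_1.mp hj
          simp only [decide_eq_true_eq]
          exact hmin j hj'.1 (by omega)
        rw [hzero]
        simp [hpre]
        ring

theorem countP_disj {α : Type} (l : List α) (p q : α → Bool)
    (h : ∀ x ∈ l, ¬(p x = true ∧ q x = true)) :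
    l.countP (fun x => p x || q x) = l.countP p + l.countP q := by
  induction l with
  | nil => simp
  | cons a t ih =>
    have ha := h a (by simp)
    have ht := ih (fun x hx => h x (by simp [hx]))
    simp only [List.countP_cons, ht]
    cases hp : p a <;> cases hq : q a <;> simp_all <;> omega

theorem window_formula (b0 b1 b2 b3 b4 b5 b6 b7 b8 b9 b10 : Bool) :
    ((!b1 && b4 && !b5 && b6 && !b9 &&
      ((b0 && b2 && b3 && !b7 && !b8 && !b10) || (!b0 && !b2 && !b3 && b7 && b8 && b10))) = true)
      ↔ ([b0,b1,b2,b3,b4,b5,b6,b7,b8,b9,b10] = wpat1 ∨ [b0,b1,b2,b3,b4,b5,b6,b7,b8,b9,b10] = wpat2) := by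
  revert b0 b1 b2 b3 b4 b5 b6 b7 b8 b9 b10; decide

theorem take_drop_window (bs : List Bool) (c : Nat) (h : c + 11 ≤ bs.length) :
    (bs.drop c).take 11
      = [bs.getD c false, bs.getD (c+1) false, bs.getD (c+2) false, bs.getD (c+3) false,
         bs.getD (c+4) false, bs.getD (c+5) false, bs.getD (c+6) false, bs.getD (c+7) false,
         bs.getD (c+8) false, bs.getD (c+9) false, bs.getD (c+10) false] := by
  have hd : ∀ i : Nat, i < bs.length → bs.drop i = bs.getD i false :: bs.drop (i+1) := by
    intro i hi
    rw [List.drop_eq_getElem_cons hi, List.getD_eq_getElem bs false hi]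
  rw [hd c (by omega), hd (c+1) (by omega), hd (c+2) (by omega), hd (c+3) (by omega),
      hd (c+4) (by omega), hd (c+5) (by omega), hd (c+6) (by omega), hd (c+7) (by omega),
      hd (c+8) (by omega), hd (c+9) (by omega), hd (c+10) (by omega)]
  simp

theorem map_bitChar_inj (a b : List Bool) : a.map bitChar = b.map bitChar ↔ a = b := by
  constructor
  · intro h
    exact List.map_injective_iff.mpr (by intro x y; cases x <;> cases y <;> simp [bitChar]) h
  · intro h; rw [h]

theorem prefix_iff_window (bs : List Bool) (c : Nat) (pat : List Char) (w : List Bool)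
    (hw : pat = w.map bitChar) (hl : pat.length = 11) (h : c + 11 ≤ bs.length) :
    (pat <+: (bs.map bitChar).drop c)
      ↔ ([bs.getD c false, bs.getD (c+1) false, bs.getD (c+2) false, bs.getD (c+3) false,
          bs.getD (c+4) false, bs.getD (c+5) false, bs.getD (c+6) false, bs.getD (c+7) false,
          bs.getD (c+8) false, bs.getD (c+9) false, bs.getD (c+10) false] = w) := by
  rw [List.prefix_iff_eq_take, hl, ← List.map_drop, ← List.map_take, take_drop_window bs c h, hw,
      map_bitChar_inj, eq_comm]

theorem aCond_iff_prefix (bs : List Bool) (c : Nat) (h : c + 11 ≤ bs.length) :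
    aCond (fun i => PySem.List.pyGetD bs i false) (c : Int) = true
      ↔ (pat1 <+: (bs.map bitChar).drop c ∨ pat2 <+: (bs.map bitChar).drop c) := by
  have a0 : ((c:Int) + 0) = ((c : Nat) : Int) := by norm_num
  have a1 : ((c:Int) + 1) = ((c + 1 : Nat) : Int) := by push_cast; ring
  have a2 : ((c:Int) + 2) = ((c + 2 : Nat) : Int) := by push_cast; ring
  have a3 : ((c:Int) + 3) = ((c + 3 : Nat) : Int) := by push_cast; ring
  have a4 : ((c:Int) + 4) = ((c + 4 : Nat) : Int) := by push_cast; ring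
  have a5 : ((c:Int) + 5) = ((c + 5 : Nat) : Int) := by push_cast; ring
  have a6 : ((c:Int) + 6) = ((c + 6 : Nat) : Int) := by push_cast; ring
  have a7 : ((c:Int) + 7) = ((c + 7 : Nat) : Int) := by push_cast; ring
  have a8 : ((c:Int) + 8) = ((c + 8 : Nat) : Int) := by push_cast; ring
  have a9 : ((c:Int) + 9) = ((c + 9 : Nat) : Int) := by push_cast; ring
  have a10 : ((c:Int) + 10) = ((c + 10 : Nat) : Int) := by push_cast; ring
  rw [prefix_iff_window bs c pat1 wpat1 rfl rfl h, prefix_iff_window bs c pat2 wpat2 rfl rfl h]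
  simp only [aCond, a0, a1, a2, a3, a4, a5, a6, a7, a8, a9, a10, PySem.List.pyGetD_natCast]
  exact window_formula _ _ _ _ _ _ _ _ _ _ _

-- no position carries both patterns (their first characters differ)
theorem patterns_disjoint (t : List Char) : ¬(pat1 <+: t ∧ pat2 <+: t) := by
  rintro ⟨h1, h2⟩
  rw [List.prefix_iff_eq_take] at h1 h2
  have : pat1 = pat2 := by
    rw [h1, h2, show pat2.length = pat1.length from rfl]
  exact absurd this (by decide)

-- a pattern cannot match within 10 places of the end
theorem no_prefix_near_end (s pat : List Char) (hl : pat.length = 11) (c : Nat)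
    (h : s.length < c + 11) : ¬ pat <+: s.drop c := by
  intro hpre
  have := hpre.length_le
  simp [hl] at this
  omega

-- per-line equality: A's window count over [0, n-11] matches B's two find-loop counts
theorem line_eq (bs : List Bool) (hn : 11 ≤ bs.length) :
    40 * ((List.range' 0 (bs.length - 10)).countP
        (fun (c : Nat) => aCond (fun i => PySem.List.pyGetD bs i false) (c : Int)) : Int)
      = (bFind (bs.map bitChar) pat1 ((bs.map bitChar).length + 2) 0 0
         + bFind (bs.map bitChar) pat2 ((bs.map bitChar).length + 2) 0 0) * 40 := by
  set s := bs.map bitChar with hs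
  have hsl : s.length = bs.length := by simp [hs]
  rw [bFind_eq s pat1 (by decide) (s.length + 2) 0 0 (by omega) (by omega),
      bFind_eq s pat2 (by decide) (s.length + 2) 0 0 (by omega) (by omega)]
  simp only [Nat.sub_zero, zero_add]
  rw [← Nat.cast_add, ← countP_disj (List.range' 0 (s.length + 1))
        (fun i => decide (pat1 <+: s.drop i)) (fun i => decide (pat2 <+: s.drop i))
        (by intro c _; simp only [decide_eq_true_eq]; exact patterns_disjoint _)]
  have hsplit : List.range' 0 (s.length + 1)
      = List.range' 0 (bs.length - 10) ++ List.range' (0 + 1 * (bs.length - 10)) 11 := by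
    rw [List.range'_append]
    congr 1
    omega
  rw [hsplit, List.countP_append]
  have hzero : (List.range' (0 + 1 * (bs.length - 10)) 11).countP
      (fun i => decide (pat1 <+: s.drop i) || decide (pat2 <+: s.drop i)) = 0 := by
    rw [List.countP_eq_zero]
    intro j hj
    have hj' := List.mem_range'_1.mp hj
    simp only [Bool.or_eq_true, decide_eq_true_eq]
    rintro (hpre | hpre)
    · exact no_prefix_near_end s pat1 rfl j (by omega) hpre
    · exact no_prefix_near_end s pat2 rfl j (by omega) hpre
  rw [hzero]
  have hcong : (List.range' 0 (bs.length - 10)).countP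
      (fun (c : Nat) => aCond (fun i => PySem.List.pyGetD bs i false) (c : Int))
      = (List.range' 0 (bs.length - 10)).countP
          (fun i => decide (pat1 <+: s.drop i) || decide (pat2 <+: s.drop i)) := by
    apply List.countP_congr
    intro c hc
    have hc' := List.mem_range'_1.mp hc
    rw [aCond_iff_prefix bs c (by omega)]
    rw [← hs]
    simp
  rw [hcong]
  push_cast
  ring

-- aCond only reads offsets 0..10 of its index function
theorem aCond_congr (b1 b2 : Int → Bool) (c : Nat)
    (h : ∀ k : Nat, k ≤ 10 → b1 ((c + k : Nat) : Int) = b2 ((c + k : Nat) : Int)) :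
    aCond b1 (c : Int) = aCond b2 (c : Int) := by
  have a0 : ((c:Int) + 0) = ((c + 0 : Nat) : Int) := by push_cast; ring
  have a1 : ((c:Int) + 1) = ((c + 1 : Nat) : Int) := by push_cast; ring
  have a2 : ((c:Int) + 2) = ((c + 2 : Nat) : Int) := by push_cast; ring
  have a3 : ((c:Int) + 3) = ((c + 3 : Nat) : Int) := by push_cast; ring
  have a4 : ((c:Int) + 4) = ((c + 4 : Nat) : Int) := by push_cast; ring
  have a5 : ((c:Int) + 5) = ((c + 5 : Nat) : Int) := by push_cast; ring
  have a6 : ((c:Int) + 6) = ((c + 6 : Nat) : Int) := by push_cast; ring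
  have a7 : ((c:Int) + 7) = ((c + 7 : Nat) : Int) := by push_cast; ring
  have a8 : ((c:Int) + 8) = ((c + 8 : Nat) : Int) := by push_cast; ring
  have a9 : ((c:Int) + 9) = ((c + 9 : Nat) : Int) := by push_cast; ring
  have a10 : ((c:Int) + 10) = ((c + 10 : Nat) : Int) := by push_cast; ring
  simp only [aCond, a0, a1, a2, a3, a4, a5, a6, a7, a8, a9, a10,
    h 0 (by omega), h 1 (by omega), h 2 (by omega), h 3 (by omega), h 4 (by omega),
    h 5 (by omega), h 6 (by omega), h 7 (by omega), h 8 (by omega), h 9 (by omega),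
    h 10 (by omega)]

theorem getD_take (l : List Bool) (n j : Nat) (d : Bool) (hj : j < n) (hn : n ≤ l.length) :
    (l.take n).getD j d = l.getD j d := by
  have h1 : j < (l.take n).length := by simp; omega
  rw [List.getD_eq_getElem _ d h1, List.getD_eq_getElem l d (by omega), List.getElem_take]

theorem take_eq_map_range (l : List (List Bool)) (n : Nat) (hn : n ≤ l.length) :
    l.take n = (List.range n).map (fun i => l.getD i []) := by
  apply List.ext_getElem
  · simp; omega
  · intro i h1 h2
    have h1' : i < n := by simpa using h2
    simp only [List.getElem_take, List.getElem_map, List.getElem_range]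
    rw [List.getD_eq_getElem l [] (by omega)]

theorem pyRange_nonpos (z : Int) (hz : z ≤ 0) : PySem.List.pyRange 0 z 1 = [] := by
  apply List.eq_nil_iff_forall_not_mem.mpr
  intro x hx
  have := PySem.List.mem_pyRange_one.mp hx
  omega


-- abbreviations for the proof assembly
def rowB (modules : List (List Bool)) (n r : Nat) : List Bool := (modules.getD r []).take n
def colB (modules : List (List Bool)) (n col : Nat) : List Bool :=
  (List.range n).map (fun r => (modules.getD r []).getD col false)
def cntA (bs : List Bool) : Int :=
  ((List.range' 0 (bs.length - 10)).countP
    (fun (c : Nat) => aCond (fun i => PySem.List.pyGetD bs i false) (c : Int)) : Int)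
def cntB (s : List Char) : Int :=
  bFind s pat1 (s.length + 2) 0 0 + bFind s pat2 (s.length + 2) 0 0

theorem line_eq' (bs : List Bool) (hn : 11 ≤ bs.length) :
    40 * cntA bs = cntB (bs.map bitChar) * 40 := by
  unfold cntA cntB
  exact line_eq bs hn

theorem row_scan_eq (modules : List (List Bool)) (n r : Nat) (lost : Int)
    (hrl : n ≤ (modules.getD r []).length) :
    aScan (fun i => PySem.List.pyGetD (PySem.List.pyGetD modules ((r : Nat) : Int) []) i false)
        ((List.range (n - 10)).map (fun (k : Nat) => (k : Int))) false lost
      = lost + 40 * cntA (rowB modules n r) := by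
  have hbl : (rowB modules n r).length = n := by
    simp only [rowB, List.length_take]; omega
  unfold cntA
  rw [PySem.List.pyGetD_natCast, hbl, List.range_eq_range', aScan_eq]
  have hcnt : (List.range' 0 (n - 10)).countP
        (fun (c : Nat) => aCond (fun i => PySem.List.pyGetD (modules.getD r []) i false) (c : Int))
      = (List.range' 0 (n - 10)).countP
        (fun (c : Nat) => aCond (fun i => PySem.List.pyGetD (rowB modules n r) i false) (c : Int)) := by
    apply List.countP_congr
    intro c hc
    have hc' := List.mem_range'_1.mp hc
    have hcc : aCond (fun i => PySem.List.pyGetD (modules.getD r []) i false) (c : Int)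
        = aCond (fun i => PySem.List.pyGetD (rowB modules n r) i false) (c : Int) := by
      apply aCond_congr
      intro k hk
      simp only [PySem.List.pyGetD_natCast, rowB]
      exact (getD_take _ n (c + k) false (by omega) hrl).symm
    rw [hcc]
  rw [hcnt]

theorem col_scan_eq (modules : List (List Bool)) (n col : Nat) (lost : Int) :
    aScan (fun i => PySem.List.pyGetD (PySem.List.pyGetD modules i []) ((col : Nat) : Int) false)
        ((List.range (n - 10)).map (fun (k : Nat) => (k : Int))) false lost
      = lost + 40 * cntA (colB modules n col) := by
  have hbl : (colB modules n col).length = n := by simp [colB]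
  unfold cntA
  rw [hbl, List.range_eq_range', aScan_eq]
  have hcnt : (List.range' 0 (n - 10)).countP
        (fun (c : Nat) => aCond (fun i => PySem.List.pyGetD (PySem.List.pyGetD modules i []) ((col : Nat) : Int) false) (c : Int))
      = (List.range' 0 (n - 10)).countP
        (fun (c : Nat) => aCond (fun i => PySem.List.pyGetD (colB modules n col) i false) (c : Int)) := by
    apply List.countP_congr
    intro c hc
    have hc' := List.mem_range'_1.mp hc
    have hcc : aCond (fun i => PySem.List.pyGetD (PySem.List.pyGetD modules i []) ((col : Nat) : Int) false) (c : Int)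
        = aCond (fun i => PySem.List.pyGetD (colB modules n col) i false) (c : Int) := by
      apply aCond_congr
      intro k hk
      have hck : c + k < n := by omega
      simp only [PySem.List.pyGetD_natCast]
      rw [List.getD_eq_getElem (colB modules n col) false (by simp [colB]; omega)]
      simp [colB, hck]
    rw [hcc]
  rw [hcnt]

-- ===== VERDICT (by name: the statement is the Claim_ definition above) =====
theorem lost_point_level3_py_spec : Claim_equal_lost_point_level3_py := by
  intro modules modules_count _ hPre
  unfold Spec_lost_point_level3_py
  simp only [lost_point_level3_py, lost_point_level3_py_alt]
  by_cases hsmall : modules_count < 11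
  · rw [if_pos hsmall]
    have hmrs : PySem.List.pyRange 0 (modules_count - 10) 1 = [] := pyRange_nonpos _ (by omega)
    rw [hmrs]
    simp only [aScan]
    rw [PySem.List.foldl_ignore, PySem.List.foldl_ignore]
  · rw [if_neg hsmall]
    obtain ⟨n, hmc⟩ : ∃ n : Nat, modules_count = (n : Int) :=
      ⟨modules_count.toNat, by omega⟩
    subst hmc
    have hn11 : 11 ≤ n := by omega
    have hlen : n ≤ modules.length := by
      have := hPre.1
      omega
    have hrows : ∀ r, r < n → n ≤ (modules.getD r []).length := by
      intro r hr
      have hmem : modules.getD r [] ∈ modules.take ((n : Int)).toNat := by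
        rw [Int.toNat_natCast, take_eq_map_range modules n hlen]
        exact List.mem_map.mpr ⟨r, List.mem_range.mpr hr, rfl⟩
      have := hPre.2 (by omega) _ hmem
      omega
    have hmr : PySem.List.pyRange 0 ((n : Nat) : Int) 1
        = (List.range n).map (fun (k : Nat) => (k : Int)) :=
      PySem.List.pyRange_zero_natCast n
    have hmrs : PySem.List.pyRange 0 (((n : Nat) : Int) - 10) 1
        = (List.range (n - 10)).map (fun (k : Nat) => (k : Int)) := by
      rw [show ((n : Nat) : Int) - 10 = ((n - 10 : Nat) : Int) from by omega]
      exact PySem.List.pyRange_zero_natCast (n - 10)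
    rw [hmr, hmrs, Int.toNat_natCast]
    rw [List.foldl_map, List.foldl_map]
    -- A side: both folds become sums of per-line counts
    rw [PySem.List.foldl_congr_mem _ _
        (fun (lost : Int) (col : Nat) => lost + 40 * cntA (colB modules n col)) _
        (by
          intro acc col _
          exact col_scan_eq modules n col acc)]
    rw [PySem.List.foldl_add]
    rw [PySem.List.foldl_congr_mem _ _
        (fun (lost : Int) (r : Nat) => lost + 40 * cntA (rowB modules n r)) _
        (by
          intro acc r hr
          exact row_scan_eq modules n r acc (hrows r (List.mem_range.mp hr)))]
    rw [PySem.List.foldl_add]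
    -- B side: the fold becomes a sum of per-line counts
    rw [PySem.List.foldl_congr_mem _ _
        (fun (total : Int) (s : List Char) => total + cntB s) _
        (by
          intro acc s _
          simp only [cntB]
          ring)]
    rw [PySem.List.foldl_add]
    rw [List.map_append, List.sum_append]
    rw [take_eq_map_range modules n hlen]
    simp only [List.map_map, zero_add]
    have hb1 : List.map (cntB ∘ (fun row => List.map bitChar (List.take n row)) ∘ fun i => modules.getD i [])
          (List.range n)
        = List.map (fun r => cntA (rowB modules n r)) (List.range n) := by
      apply List.map_congr_left
      intro r hr
      have h11 : 11 ≤ (rowB modules n r).length := by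
        simp only [rowB, List.length_take]
        have := hrows r (List.mem_range.mp hr)
        omega
      have hle := line_eq' (rowB modules n r) h11
      simp only [Function.comp_apply]
      have hshape : List.map bitChar (List.take n (modules.getD r []))
          = (rowB modules n r).map bitChar := rfl
      rw [hshape]
      omega
    have hb2 : List.map (cntB ∘ fun col => List.map (fun r => bitChar ((modules.getD r []).getD col false)) (List.range n))
          (List.range n)
        = List.map (fun col => cntA (colB modules n col)) (List.range n) := by
      apply List.map_congr_left
      intro col _
      have h11 : 11 ≤ (colB modules n col).length := by simp [colB]; omega
      have hle := line_eq' (colB modules n col) h11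
      simp only [Function.comp_apply]
      rw [show List.map (fun r => bitChar ((modules.getD r []).getD col false)) (List.range n)
          = (colB modules n col).map bitChar from by simp [colB, List.map_map, Function.comp_def]]
      omega
    rw [hb1, hb2, List.sum_map_mul_left, List.sum_map_mul_left]
    ring
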